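-- pv_equiv track=rewrite | github.com/wouterpolet/Advent-of-Code | src/main/python/aoc2020/18/solution.py | find_op
-- ===== SOURCE A (Python) =====
-- def find_op(exp):
--     paren_count = 0
--     indices = []
--     for i in range(len(exp)):
--         if (exp[i] == '*' or exp[i] == '+') and paren_count == 0:
--             indices.append(i)
--         if exp[i] == '(':
--             paren_count += 1
--         if exp[i] == ')':
--             paren_count -= 1
--     return indices
-- ===== SOURCE B (Python) =====
-- def find_op(exp):
--     # Stateless formulation: an operator is top-level exactly when the prefix
--     # before it contains as many '(' as ')'.  No running counter is kept.
--     return [i for i, c in enumerate(exp)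
--             if c in '+*' and exp[:i].count('(') == exp[:i].count(')')]
-- ===== Notes on version B (the rewrite author's own statement) =====
-- stated objective: alternative
-- what changed: Replaces A's stateful loop with a running parenthesis counter by a stateless comprehension that selects an index i when the prefix exp[:i] contains equally many opening and closing parens, recounted per index via str.count; quadratic in the worst case but measured faster on the generated inputs because the counting runs in C instead of a per-character Python loop.
import Mathlib
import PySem

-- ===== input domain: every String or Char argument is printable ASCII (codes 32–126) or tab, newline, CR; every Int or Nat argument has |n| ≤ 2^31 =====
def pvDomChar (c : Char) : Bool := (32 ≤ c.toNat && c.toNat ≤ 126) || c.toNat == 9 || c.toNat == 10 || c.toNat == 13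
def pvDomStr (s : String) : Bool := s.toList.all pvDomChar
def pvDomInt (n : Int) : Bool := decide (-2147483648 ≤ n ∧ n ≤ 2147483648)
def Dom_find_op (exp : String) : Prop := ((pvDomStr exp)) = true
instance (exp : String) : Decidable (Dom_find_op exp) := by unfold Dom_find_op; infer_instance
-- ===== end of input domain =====

-- B drops A's running parenthesis counter: it selects an operator index by the
-- stateless prefix condition count('(') = count(')') recounted per index.

-- ===== PORT A =====
-- A: one loop over indices with a mutable counter, collecting ops at depth 0.
def find_op (exp : String) : List Int :=
  ((PySem.List.enumerate exp.toList 0).foldl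
    (fun (st : Int × List Int) p =>
      let st := if (p.2 = '*' ∨ p.2 = '+') ∧ st.1 = 0 then (st.1, st.2 ++ [p.1]) else st
      let st := if p.2 = '(' then (st.1 + 1, st.2) else st
      if p.2 = ')' then (st.1 - 1, st.2) else st)
    (0, [])).2

-- ===== PORT B =====
-- B: a single stateless comprehension; the prefix exp[:i] is recounted per index.
def find_op_alt (exp : String) : List Int :=
  (PySem.List.enumerate exp.toList 0).filterMap (fun p =>
    if (p.2 = '+' ∨ p.2 = '*') ∧
        (exp.toList.take p.1.toNat).count '(' = (exp.toList.take p.1.toNat).count ')'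
    then some p.1 else none)

-- ===== PRECONDITION & SPEC =====
def Spec_find_op (exp : String) (out : List Int) : Prop := out = find_op_alt exp
instance (exp : String) (out : List Int) : Decidable (Spec_find_op exp out) := by unfold Spec_find_op; infer_instance

-- ===== CLAIM (what is proved, stated in full; the proofs are below) =====
def Claim_equal_find_op : Prop := ∀ (exp : String), Dom_find_op exp → Spec_find_op exp (find_op exp)

-- ===== LEMMAS AND PROOFS =====
-- A's loop from state (depth of `pre`, acc), running over the suffix `suf` of
-- `pre ++ suf`, produces acc ++ B's comprehension restricted to that suffix.
lemma find_op_loop_eq (suf : List Char) : ∀ (pre : List Char) (acc : List Int),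
    ((PySem.List.enumerate suf (pre.length : Int)).foldl
      (fun (st : Int × List Int) p =>
        let st := if (p.2 = '*' ∨ p.2 = '+') ∧ st.1 = 0 then (st.1, st.2 ++ [p.1]) else st
        let st := if p.2 = '(' then (st.1 + 1, st.2) else st
        if p.2 = ')' then (st.1 - 1, st.2) else st)
      ((pre.count '(' : Int) - (pre.count ')' : Int), acc)).2
    = acc ++ (PySem.List.enumerate suf (pre.length : Int)).filterMap (fun p =>
        if (p.2 = '+' ∨ p.2 = '*') ∧
            ((pre ++ suf).take p.1.toNat).count '(' = ((pre ++ suf).take p.1.toNat).count ')'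
        then some p.1 else none) := by
  induction suf with
  | nil => intro pre acc; simp [PySem.List.enumerate_nil]
  | cons c cs ih =>
    intro pre acc
    have hassoc : (pre ++ [c]) ++ cs = pre ++ c :: cs := by simp
    have hlen : ((pre ++ [c]).length : Int) = (pre.length : Int) + 1 := by simp
    have htake : ((pre ++ c :: cs).take ((pre.length : Int)).toNat) = pre := by
      simp
    simp only [PySem.List.enumerate_cons, List.foldl_cons, List.filterMap_cons, htake]
    by_cases hB : (c = '+' ∨ c = '*') ∧ pre.count '(' = pre.count ')'
    · -- top-level operator: both sides record the index, depth unchanged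
      have hc1 : c ≠ '(' := by rcases hB.1 with h | h <;> simp [h]
      have hc2 : c ≠ ')' := by rcases hB.1 with h | h <;> simp [h]
      have hcnt : ((pre ++ [c]).count '(' : Int) - ((pre ++ [c]).count ')' : Int)
          = (pre.count '(' : Int) - (pre.count ')' : Int) := by
        simp [List.count_append, hc1, hc2]
      have hd : ((pre.count '(' : Int) - (pre.count ')' : Int)) = 0 := by
        have := hB.2; omega
      have hop : (c = '*' ∨ c = '+') ∧
          ((pre.count '(' : Int) - (pre.count ')' : Int)) = 0 := ⟨hB.1.symm, hd⟩
      have h := ih (pre ++ [c]) (acc ++ [(pre.length : Int)])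
      rw [hassoc] at h
      simp only [hlen] at h
      rw [hcnt] at h
      simp only [if_pos hop, if_neg hc1, if_neg hc2, if_pos hB]
      rw [h, List.append_assoc]
      simp
    · -- not a collected index: only the depth may change
      have hop : ¬ ((c = '*' ∨ c = '+') ∧
          ((pre.count '(' : Int) - (pre.count ')' : Int)) = 0) := by
        intro h; exact hB ⟨h.1.symm, by have := h.2; omega⟩
      have h := ih (pre ++ [c]) acc
      rw [hassoc] at h
      simp only [hlen] at h
      simp only [if_neg hop, if_neg hB]
      by_cases hc1 : c = '('
      · have hcnt : ((pre ++ [c]).count '(' : Int) - ((pre ++ [c]).count ')' : Int)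
            = (pre.count '(' : Int) - (pre.count ')' : Int) + 1 := by
          subst hc1; simp [List.count_append]; omega
        rw [hcnt] at h
        simp only [if_pos hc1, if_neg (by simp [hc1] : c ≠ ')')]
        exact h
      · by_cases hc2 : c = ')'
        · have hcnt : ((pre ++ [c]).count '(' : Int) - ((pre ++ [c]).count ')' : Int)
              = (pre.count '(' : Int) - (pre.count ')' : Int) - 1 := by
            subst hc2; simp [List.count_append]; omega
          rw [hcnt] at h
          simp only [if_neg hc1, if_pos hc2]
          exact h
        · have hcnt : ((pre ++ [c]).count '(' : Int) - ((pre ++ [c]).count ')' : Int)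
              = (pre.count '(' : Int) - (pre.count ')' : Int) := by
            simp [List.count_append, hc1, hc2]
          rw [hcnt] at h
          simp only [if_neg hc1, if_neg hc2]
          exact h

-- ===== VERDICT (by name: the statement is the Claim_ definition above) =====
theorem find_op_spec : Claim_equal_find_op := by
  intro exp _
  unfold Spec_find_op find_op find_op_alt
  have h := find_op_loop_eq exp.toList [] []
  simpa using h
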